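-- pv_equiv track=rewrite | github.com/AEYohn/MedMink | src/medgemma/medication_safety.py | _classify_drug
-- ===== SOURCE A (Python) =====
-- KNOWN_MAJOR_INTERACTIONS = {
--     ("warfarin", "aspirin"): {
--         "description": "Increased risk of bleeding when combined",
--         "recommendation": "Monitor closely for signs of bleeding. Consider alternative if possible.",
--     },
--     ("metformin", "alcohol"): {
--         "description": "Risk of lactic acidosis, especially with heavy alcohol use",
--         "recommendation": "Limit alcohol consumption. Monitor for symptoms of lactic acidosis.",
--     },
--     ("ssri", "maoi"): {
--         "description": "Risk of serotonin syndrome, potentially life-threatening",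
--         "recommendation": "These medications should not be combined. Wait 14 days between.",
--     },
--     ("ace inhibitor", "potassium"): {
--         "description": "Risk of dangerously high potassium levels (hyperkalemia)",
--         "recommendation": "Monitor potassium levels regularly. May need dose adjustment.",
--     },
--     ("statin", "grapefruit"): {
--         "description": "Grapefruit can increase statin levels, raising risk of side effects",
--         "recommendation": "Avoid grapefruit and grapefruit juice while taking statins.",
--     },
-- }
--
-- DRUG_CLASSES = {
--     "ssri": [
--         "sertraline",
--         "fluoxetine",
--         "paroxetine",
--         "citalopram",
--         "escitalopram",
--         "prozac",
--         "zoloft",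
--         "paxil",
--         "lexapro",
--     ],
--     "maoi": ["phenelzine", "tranylcypromine", "selegiline", "isocarboxazid", "nardil", "parnate"],
--     "statin": [
--         "atorvastatin",
--         "simvastatin",
--         "rosuvastatin",
--         "pravastatin",
--         "lovastatin",
--         "lipitor",
--         "crestor",
--         "zocor",
--     ],
--     "ace inhibitor": [
--         "lisinopril",
--         "enalapril",
--         "ramipril",
--         "benazepril",
--         "captopril",
--         "prinivil",
--         "vasotec",
--     ],
--     "blood thinner": ["warfarin", "coumadin", "eliquis", "xarelto", "apixaban", "rivaroxaban"],
--     "nsaid": ["ibuprofen", "naproxen", "aspirin", "advil", "motrin", "aleve"],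
--     "opioid": [
--         "hydrocodone",
--         "oxycodone",
--         "morphine",
--         "codeine",
--         "tramadol",
--         "vicodin",
--         "percocet",
--     ],
--     "benzodiazepine": [
--         "alprazolam",
--         "lorazepam",
--         "diazepam",
--         "clonazepam",
--         "xanax",
--         "ativan",
--         "valium",
--         "klonopin",
--     ],
-- }
--
-- def _get_medication_data():
--     """Return the interaction and drug class data."""
--     return KNOWN_MAJOR_INTERACTIONS, DRUG_CLASSES
--
-- def _classify_drug(drug_name: str) -> str | None:
--     """Map a drug name to its drug class using DRUG_CLASSES dict."""
--     _, drug_classes = _get_medication_data()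
--     drug_lower = drug_name.lower().strip()
--     # Strip dosage info (e.g., "aspirin 325mg" → "aspirin")
--     drug_base = drug_lower.split()[0] if drug_lower else drug_lower
--     for drug_class, members in drug_classes.items():
--         if drug_base in members or drug_lower in members:
--             return drug_class
--     return None
-- ===== SOURCE B (Python) =====
-- # Flat reverse lookup table: member drug name -> drug class.
-- # Every member in DRUG_CLASSES is a single whitespace-free word and member
-- # names are unique across classes, so looking up only the first word of the
-- # normalized name in this table gives exactly the class A's scan finds.
-- _REVERSE = {
--     'sertraline': 'ssri',
--     'fluoxetine': 'ssri',
--     'paroxetine': 'ssri',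
--     'citalopram': 'ssri',
--     'escitalopram': 'ssri',
--     'prozac': 'ssri',
--     'zoloft': 'ssri',
--     'paxil': 'ssri',
--     'lexapro': 'ssri',
--     'phenelzine': 'maoi',
--     'tranylcypromine': 'maoi',
--     'selegiline': 'maoi',
--     'isocarboxazid': 'maoi',
--     'nardil': 'maoi',
--     'parnate': 'maoi',
--     'atorvastatin': 'statin',
--     'simvastatin': 'statin',
--     'rosuvastatin': 'statin',
--     'pravastatin': 'statin',
--     'lovastatin': 'statin',
--     'lipitor': 'statin',
--     'crestor': 'statin',
--     'zocor': 'statin',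
--     'lisinopril': 'ace inhibitor',
--     'enalapril': 'ace inhibitor',
--     'ramipril': 'ace inhibitor',
--     'benazepril': 'ace inhibitor',
--     'captopril': 'ace inhibitor',
--     'prinivil': 'ace inhibitor',
--     'vasotec': 'ace inhibitor',
--     'warfarin': 'blood thinner',
--     'coumadin': 'blood thinner',
--     'eliquis': 'blood thinner',
--     'xarelto': 'blood thinner',
--     'apixaban': 'blood thinner',
--     'rivaroxaban': 'blood thinner',
--     'ibuprofen': 'nsaid',
--     'naproxen': 'nsaid',
--     'aspirin': 'nsaid',
--     'advil': 'nsaid',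
--     'motrin': 'nsaid',
--     'aleve': 'nsaid',
--     'hydrocodone': 'opioid',
--     'oxycodone': 'opioid',
--     'morphine': 'opioid',
--     'codeine': 'opioid',
--     'tramadol': 'opioid',
--     'vicodin': 'opioid',
--     'percocet': 'opioid',
--     'alprazolam': 'benzodiazepine',
--     'lorazepam': 'benzodiazepine',
--     'diazepam': 'benzodiazepine',
--     'clonazepam': 'benzodiazepine',
--     'xanax': 'benzodiazepine',
--     'ativan': 'benzodiazepine',
--     'valium': 'benzodiazepine',
--     'klonopin': 'benzodiazepine',
-- }
--
--
-- def _classify_drug(drug_name: str) -> str | None: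
--     """Map a drug name to its drug class via a flat member->class table."""
--     words = drug_name.lower().strip().split()
--     return _REVERSE.get(words[0]) if words else None
-- ===== Notes on version B (the rewrite author's own statement) =====
-- stated objective: alternative
-- what changed: Replaces A's per-call scan over every drug class with membership tests in each member list by a flat precomputed member->class table and a single lookup of the first word of the normalized name (the full-string fallback is dropped because every member is one whitespace-free word).
import Mathlib
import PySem

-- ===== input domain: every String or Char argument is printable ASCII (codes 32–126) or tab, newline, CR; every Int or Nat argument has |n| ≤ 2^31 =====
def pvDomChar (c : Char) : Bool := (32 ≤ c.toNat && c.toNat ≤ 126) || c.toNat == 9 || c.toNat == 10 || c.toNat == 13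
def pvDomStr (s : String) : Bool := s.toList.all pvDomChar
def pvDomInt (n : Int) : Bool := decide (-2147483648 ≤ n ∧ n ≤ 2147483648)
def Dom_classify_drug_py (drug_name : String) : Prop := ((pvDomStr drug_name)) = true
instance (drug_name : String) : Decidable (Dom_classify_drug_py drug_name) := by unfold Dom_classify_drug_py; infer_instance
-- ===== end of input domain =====

-- B replaces A's per-call scan over the drug classes by a flat precomputed
-- member->class table and a single lookup of the first word of the normalized
-- name (alternative data structure; no speed claim).



-- ===== PORT A =====
-- DRUG_CLASSES as an insertion-ordered association list (module constant)
def pvDrugClasses : List (String × List String) :=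
  [ ("ssri", ["sertraline", "fluoxetine", "paroxetine", "citalopram", "escitalopram",
              "prozac", "zoloft", "paxil", "lexapro"]),
    ("maoi", ["phenelzine", "tranylcypromine", "selegiline", "isocarboxazid", "nardil", "parnate"]),
    ("statin", ["atorvastatin", "simvastatin", "rosuvastatin", "pravastatin", "lovastatin",
                "lipitor", "crestor", "zocor"]),
    ("ace inhibitor", ["lisinopril", "enalapril", "ramipril", "benazepril", "captopril",
                       "prinivil", "vasotec"]),
    ("blood thinner", ["warfarin", "coumadin", "eliquis", "xarelto", "apixaban", "rivaroxaban"]),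
    ("nsaid", ["ibuprofen", "naproxen", "aspirin", "advil", "motrin", "aleve"]),
    ("opioid", ["hydrocodone", "oxycodone", "morphine", "codeine", "tramadol", "vicodin", "percocet"]),
    ("benzodiazepine", ["alprazolam", "lorazepam", "diazepam", "clonazepam", "xanax", "ativan",
                        "valium", "klonopin"]) ]

-- A's for-loop over drug_classes.items(): first class whose members contain base or lower
def pvLoopA : List (String × List String) → String → String → Option String
  | [], _, _ => none
  | (cls, members) :: rest, b, l =>
      if b ∈ members ∨ l ∈ members then some cls else pvLoopA rest b l

def classify_drug_py (drug_name : String) : Option String :=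
  let drug_lower := PySem.Str.strip (PySem.Str.lower drug_name)
  -- drug_lower.split()[0] if drug_lower else drug_lower  (pyGet? none = IndexError;
  -- that branch is unreachable: split of a nonempty stripped string is nonempty)
  match (if drug_lower ≠ "" then PySem.List.pyGet? (PySem.Str.split₀ drug_lower) 0
         else some drug_lower) with
  | none => none
  | some drug_base => pvLoopA pvDrugClasses drug_base drug_lower

-- ===== PORT B =====
-- Source B's module-level flat dict literal _REVERSE = {member: class, ...}
def pvReverseTable : PySem.Dict String String := PySem.Dict.mk [
    ("sertraline", "ssri"),
    ("fluoxetine", "ssri"),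
    ("paroxetine", "ssri"),
    ("citalopram", "ssri"),
    ("escitalopram", "ssri"),
    ("prozac", "ssri"),
    ("zoloft", "ssri"),
    ("paxil", "ssri"),
    ("lexapro", "ssri"),
    ("phenelzine", "maoi"),
    ("tranylcypromine", "maoi"),
    ("selegiline", "maoi"),
    ("isocarboxazid", "maoi"),
    ("nardil", "maoi"),
    ("parnate", "maoi"),
    ("atorvastatin", "statin"),
    ("simvastatin", "statin"),
    ("rosuvastatin", "statin"),
    ("pravastatin", "statin"),
    ("lovastatin", "statin"),
    ("lipitor", "statin"),
    ("crestor", "statin"),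
    ("zocor", "statin"),
    ("lisinopril", "ace inhibitor"),
    ("enalapril", "ace inhibitor"),
    ("ramipril", "ace inhibitor"),
    ("benazepril", "ace inhibitor"),
    ("captopril", "ace inhibitor"),
    ("prinivil", "ace inhibitor"),
    ("vasotec", "ace inhibitor"),
    ("warfarin", "blood thinner"),
    ("coumadin", "blood thinner"),
    ("eliquis", "blood thinner"),
    ("xarelto", "blood thinner"),
    ("apixaban", "blood thinner"),
    ("rivaroxaban", "blood thinner"),
    ("ibuprofen", "nsaid"),
    ("naproxen", "nsaid"),
    ("aspirin", "nsaid"),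
    ("advil", "nsaid"),
    ("motrin", "nsaid"),
    ("aleve", "nsaid"),
    ("hydrocodone", "opioid"),
    ("oxycodone", "opioid"),
    ("morphine", "opioid"),
    ("codeine", "opioid"),
    ("tramadol", "opioid"),
    ("vicodin", "opioid"),
    ("percocet", "opioid"),
    ("alprazolam", "benzodiazepine"),
    ("lorazepam", "benzodiazepine"),
    ("diazepam", "benzodiazepine"),
    ("clonazepam", "benzodiazepine"),
    ("xanax", "benzodiazepine"),
    ("ativan", "benzodiazepine"),
    ("valium", "benzodiazepine"),
    ("klonopin", "benzodiazepine")
 ]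

def classify_drug_py_alt (drug_name : String) : Option String :=
  -- words = drug_name.lower().strip().split()
  -- return _REVERSE.get(words[0]) if words else None
  match PySem.Str.split₀ (PySem.Str.strip (PySem.Str.lower drug_name)) with
  | [] => none
  | w :: _ => pvReverseTable.get? w

-- ===== PRECONDITION & SPEC =====
def Spec_classify_drug_py (drug_name : String) (out : Option String) : Prop := out = classify_drug_py_alt drug_name
instance (drug_name : String) (out : Option String) : Decidable (Spec_classify_drug_py drug_name out) := by unfold Spec_classify_drug_py; infer_instance

-- ===== CLAIM =====
def Claim_equal_classify_drug_py : Prop := ∀ (drug_name : String), Dom_classify_drug_py drug_name → Spec_classify_drug_py drug_name (classify_drug_py drug_name)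

-- ===== LEMMAS AND PROOFS =====

def pvAllMembers : List String := pvDrugClasses.flatMap Prod.snd

set_option maxRecDepth 4000 in
-- every member is a single whitespace-free word: splitting it yields itself
theorem pv_split_member : ∀ m ∈ pvAllMembers, PySem.Str.split₀ m = [m] := by decide

set_option maxRecDepth 4000 in
set_option maxHeartbeats 1000000 in
-- on member strings, A's scan agrees with the flat-table lookup
theorem pv_agree_self : ∀ x ∈ pvAllMembers, pvLoopA pvDrugClasses x x = pvReverseTable.get? x := by decide

set_option maxRecDepth 4000 in
-- the table's keys are exactly the members, in scan order
theorem pv_table_keys : pvReverseTable.keys = pvAllMembers := by decide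

-- a literal dict has no entry for a string that is none of its keys
theorem pv_get?_mk_none (x : String) :
    ∀ (ps : List (String × String)), x ∉ ps.map Prod.fst →
      (PySem.Dict.mk ps).get? x = none := by
  intro ps
  induction ps with
  | nil => intro _; rfl
  | cons p rest ih =>
    intro hx
    obtain ⟨k, v⟩ := p
    rw [PySem.Dict.get?_mk_cons]
    have hk : k ≠ x := fun h => hx (by simp [h])
    simp only [beq_iff_eq, hk, if_false]
    exact ih (fun h => hx (List.mem_cons_of_mem _ h))

theorem pv_table_none (x : String) (hx : x ∉ pvAllMembers) :
    pvReverseTable.get? x = none := by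
  apply pv_get?_mk_none
  intro h
  exact hx (by rw [← pv_table_keys]; exact h)

theorem pv_loopA_drop_l (b l : String) :
    ∀ (cs : List (String × List String)), (∀ c ∈ cs, l ∉ c.2) →
      pvLoopA cs b l = pvLoopA cs b b := by
  intro cs
  induction cs with
  | nil => intro _; rfl
  | cons c rest ih =>
    intro hx
    obtain ⟨cls, members⟩ := c
    have hlm : l ∉ members := hx (cls, members) List.mem_cons_self
    simp only [pvLoopA]
    by_cases hb : b ∈ members
    · simp [hb]
    · simp [hb, hlm, ih (fun c' hc' => hx c' (List.mem_cons_of_mem _ hc'))]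

theorem pv_loopA_none (b : String) :
    ∀ (cs : List (String × List String)), (∀ c ∈ cs, b ∉ c.2) →
      pvLoopA cs b b = none := by
  intro cs
  induction cs with
  | nil => intro _; rfl
  | cons c rest ih =>
    intro hx
    obtain ⟨cls, members⟩ := c
    have hbm : b ∉ members := hx (cls, members) List.mem_cons_self
    simp only [pvLoopA]
    simp [hbm, ih (fun c' hc' => hx c' (List.mem_cons_of_mem _ hc'))]

theorem pv_not_mem_classes (x : String) (hx : x ∉ pvAllMembers) :
    ∀ c ∈ pvDrugClasses, x ∉ c.2 := by
  intro c hc hm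
  exact hx (List.mem_flatMap.mpr ⟨c, hc, hm⟩)

-- the shared core: A's scan at (first word w, full string l) equals B's table lookup at w
theorem pv_core_agree (w l : String) (H : l ∈ pvAllMembers → w = l) :
    pvLoopA pvDrugClasses w l = pvReverseTable.get? w := by
  by_cases hl : l ∈ pvAllMembers
  · rw [H hl]
    exact pv_agree_self l hl
  · rw [pv_loopA_drop_l w l _ (pv_not_mem_classes l hl)]
    by_cases hw : w ∈ pvAllMembers
    · exact pv_agree_self w hw
    · rw [pv_loopA_none w _ (pv_not_mem_classes w hw), pv_table_none w hw]

-- ===== VERDICT =====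
set_option maxRecDepth 4000 in
theorem classify_drug_py_spec : Claim_equal_classify_drug_py := by
  intro drug_name _
  unfold Spec_classify_drug_py classify_drug_py classify_drug_py_alt
  simp only []
  generalize PySem.Str.strip (PySem.Str.lower drug_name) = l
  by_cases hne : l = ""
  · subst hne
    norm_num
    decide
  · rw [if_pos hne]
    cases hsp : PySem.Str.split₀ l with
    | nil => simp [PySem.List.pyGet?, PySem.List.pyIdx?]
    | cons w ws =>
      have hw0 : PySem.List.pyGet? (w :: ws) 0 = some w := by
        simp [PySem.List.pyGet?, PySem.List.pyIdx?]
      rw [hw0]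
      have H : l ∈ pvAllMembers → w = l := by
        intro hl
        have := pv_split_member l hl
        rw [hsp] at this
        exact (List.cons.injEq _ _ _ _ ▸ this).1
      exact pv_core_agree w l H
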